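-- pv_equiv track=rewrite | github.com/manabcodes/bpmn2odrl | web-service-2/main.py | build_dominance_tree
-- ===== SOURCE A (Python) =====
-- from collections import defaultdict, deque
--
-- def build_dominance_tree(start, dag_nodes, dag_succ):
--     topo = []
--     visited = set()
--     q = deque([start])
--     while q:
--         v = q.popleft()
--         if v in visited:
--             continue
--         visited.add(v)
--         topo.append(v)
--         for w in dag_succ.get(v, []):
--             if w not in visited:
--                 q.append(w)
--
--     dag_pred = defaultdict(list)
--     for v in topo:
--         for w in dag_succ.get(v, []):
--             if w in visited:
--                 dag_pred[w].append(v)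
--
--     all_nodes = set(topo)
--     dom = {start: {start}}
--     for n in topo[1:]:
--         dom[n] = all_nodes.copy()
--
--     changed = True
--     while changed:
--         changed = False
--         for n in topo[1:]:
--             preds = dag_pred.get(n, [])
--             if not preds:
--                 new_dom = {n}
--             else:
--                 new_dom = None
--                 for p in preds:
--                     if new_dom is None:
--                         new_dom = dom[p].copy()
--                     else:
--                         new_dom &= dom[p]
--                 new_dom = (new_dom or set()) | {n}
--             if new_dom != dom[n]:
--                 dom[n] = new_dom
--                 changed = True
--
--     idom = {start: None}
--     for n in topo[1:]:
--         doms_of_n = dom[n] - {n}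
--         idom_n = None
--         for d in doms_of_n:
--             if doms_of_n - {d} <= dom.get(d, set()):
--                 idom_n = d
--                 break
--         idom[n] = idom_n
--
--     return idom
-- ===== SOURCE B (Python) =====
-- from collections import deque
--
-- def build_dominance_tree(start, dag_nodes, dag_succ):
--     # BFS discovery order from start (fixes the output ordering)
--     order = []
--     seen = set()
--     q = deque([start])
--     while q:
--         v = q.popleft()
--         if v in seen:
--             continue
--         seen.add(v)
--         order.append(v)
--         for w in dag_succ.get(v, []):
--             if w not in seen:
--                 q.append(w)
--
--     # reach_wo[d] = set of nodes reachable from start along walks that avoid d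
--     reach_wo = {}
--     for d in order:
--         reach = set()
--         frontier = []
--         if start != d:
--             reach.add(start)
--             frontier.append(start)
--         while frontier:
--             nxt = []
--             for v in frontier:
--                 for w in dag_succ.get(v, []):
--                     if w != d and w not in reach:
--                         reach.add(w)
--                         nxt.append(w)
--             frontier = nxt
--         reach_wo[d] = reach
--
--     # d dominates n  iff  n is unreachable once d is removed
--     idom = {start: None}
--     for n in order[1:]:
--         dom_n = [d for d in order if n not in reach_wo[d]]
--         best = None
--         for d in reversed(dom_n):
--             if d == n:
--                 continue
--             if all(c == n or c == d or d not in reach_wo[c] for c in dom_n):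
--                 best = d
--                 break
--         idom[n] = best
--     return idom
-- ===== Notes on version B (the rewrite author's own statement) =====
-- stated objective: alternative
-- what changed: Replaces the iterate-to-fixpoint dominator-set dataflow (repeated passes intersecting predecessor sets until nothing changes) by a direct definition: d dominates n iff n becomes unreachable when d is removed, computed with one BFS per node; the immediate dominator is then found by scanning candidates deepest-first.
import Mathlib
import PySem

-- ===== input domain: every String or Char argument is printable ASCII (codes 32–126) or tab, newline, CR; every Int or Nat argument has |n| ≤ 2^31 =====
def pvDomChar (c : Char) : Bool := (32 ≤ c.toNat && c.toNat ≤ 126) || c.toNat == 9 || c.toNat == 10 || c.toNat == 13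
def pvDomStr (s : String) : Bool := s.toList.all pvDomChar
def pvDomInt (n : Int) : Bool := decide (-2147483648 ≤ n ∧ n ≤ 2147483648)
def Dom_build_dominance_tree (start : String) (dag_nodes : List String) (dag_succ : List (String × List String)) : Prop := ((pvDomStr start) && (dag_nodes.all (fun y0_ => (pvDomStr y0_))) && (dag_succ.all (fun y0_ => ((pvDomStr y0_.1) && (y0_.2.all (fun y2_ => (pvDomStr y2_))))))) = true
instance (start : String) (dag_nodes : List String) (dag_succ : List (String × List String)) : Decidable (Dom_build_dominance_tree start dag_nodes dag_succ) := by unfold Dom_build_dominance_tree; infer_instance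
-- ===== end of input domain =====

-- ===== PORT A =====
-- Port of A (and of the identical BFS prologue of B).  One honest line: B replaces A's
-- iterate-to-fixpoint dominator-set dataflow by removal-reachability dominators (one BFS
-- per node); objective: alternative algorithm of similar cost (not measured faster).

-- dag_succ.get(v, []) (dict lookup, first match)
def pvSucc (dag_succ : List (String × List String)) (v : String) : List String :=
  (PySem.Dict.mk dag_succ).getD v []

-- fuel bound used by the BFS loops: total length of all successor lists
def pvSuccTotal (dag_succ : List (String × List String)) : Nat :=
  (dag_succ.map (fun p => p.2.length)).sum

-- the BFS `while q:` loop shared verbatim by A and B (q, visited, topo); fuel only makes it total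
def pvBFS (dag_succ : List (String × List String)) :
    Nat → List String → PySem.Set String → List String → (PySem.Set String × List String)
  | 0, _, visited, topo => (visited, topo)
  | _ + 1, [], visited, topo => (visited, topo)
  | fuel + 1, v :: q, visited, topo =>
    if v ∈ visited then pvBFS dag_succ fuel q visited topo
    else
      let visited' := PySem.Set.add visited v
      pvBFS dag_succ fuel
        (q ++ (pvSucc dag_succ v).filter (fun w => !(PySem.Set.contains visited' w)))
        visited' (topo ++ [v])

-- new_dom for one n: {n} if no preds, else (∩ of dom[p]) ∪ {n}
def pvNewDom (dom : PySem.Dict String (PySem.Set String)) (preds : List String) (n : String) :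
    PySem.Set String :=
  match preds with
  | [] => PySem.Set.ofList [n]
  | p :: ps =>
    PySem.Set.union (ps.foldl (fun s p' => PySem.Set.inter s (dom.getD p' [])) (dom.getD p [])) [n]

-- one `for n in topo[1:]:` pass of A's dataflow loop; second component = changed
def pvPassA (predf : String → List String) (topo1 : List String)
    (dom : PySem.Dict String (PySem.Set String)) : PySem.Dict String (PySem.Set String) × Bool :=
  topo1.foldl
    (fun st n =>
      let new_dom := pvNewDom st.1 (predf n) n
      if PySem.Set.equal new_dom (st.1.getD n []) then st else (st.1.insert n new_dom, true))
    (dom, false)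

-- A's `while changed:` loop; fuel only makes it total
def pvLoopA (predf : String → List String) (topo1 : List String) :
    Nat → PySem.Dict String (PySem.Set String) → PySem.Dict String (PySem.Set String)
  | 0, dom => dom
  | fuel + 1, dom =>
    let st := pvPassA predf topo1 dom
    if st.2 then pvLoopA predf topo1 fuel st.1 else st.1

def build_dominance_tree (start : String) (dag_nodes : List String)
    (dag_succ : List (String × List String)) : List (String × Option String) :=
  let vt := pvBFS dag_succ (pvSuccTotal dag_succ + 2) [start] [] []
  let visited := vt.1
  let topo := vt.2
  -- dag_pred = defaultdict(list); dag_pred[w].append(v)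
  let pred : PySem.Dict String (List String) :=
    topo.foldl
      (fun d v =>
        ((pvSucc dag_succ v).filter (fun w => PySem.Set.contains visited w)).foldl
          (fun d w => d.modify w [] (· ++ [v])) d)
      PySem.Dict.empty
  let all_nodes := PySem.Set.ofList topo
  -- dom = {start: {start}}; dom[n] = all_nodes.copy() for n in topo[1:]
  let dom0 :=
    (topo.drop 1).foldl (fun d n => d.insert n all_nodes)
      ((PySem.Dict.empty).insert start (PySem.Set.ofList [start]))
  let dom :=
    pvLoopA (fun n => pred.getD n []) (topo.drop 1) (topo.length * topo.length + 2) dom0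
  -- idom = {start: None}; first d in doms_of_n with doms_of_n - {d} <= dom.get(d, set())
  -- (that d is unique — proved below — so the port's set order is CPython-exact on the result)
  let idom :=
    (topo.drop 1).foldl
      (fun acc n =>
        let doms := PySem.Set.diff (dom.getD n []) [n]
        acc.insert n
          (doms.find? fun dd => PySem.Set.issubset (PySem.Set.diff doms [dd]) (dom.getD dd [])))
      ((PySem.Dict.empty).insert start (none : Option String))
  idom.items

-- ===== PORT B =====
-- per-node layered BFS of Source B: reach of start in the graph with node d removed
def pvRLoop (dag_succ : List (String × List String)) (d : String) :
    Nat → PySem.Set String → List String → PySem.Set String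
  | 0, reach, _ => reach
  | fuel + 1, reach, frontier =>
    match frontier with
    | [] => reach
    | _ :: _ =>
      let st :=
        frontier.foldl
          (fun st v =>
            (pvSucc dag_succ v).foldl
              (fun st w =>
                if w ≠ d ∧ ¬(PySem.Set.contains st.1 w) then (PySem.Set.add st.1 w, st.2 ++ [w])
                else st)
              st)
          (reach, ([] : List String))
      pvRLoop dag_succ d fuel st.1 st.2

def pvReachAvoid (dag_succ : List (String × List String)) (start d : String) :
    PySem.Set String :=
  if start ≠ d then pvRLoop dag_succ d (pvSuccTotal dag_succ + 2) [start] [start]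
  else pvRLoop dag_succ d (pvSuccTotal dag_succ + 2) [] []

def build_dominance_tree_alt (start : String) (dag_nodes : List String)
    (dag_succ : List (String × List String)) : List (String × Option String) :=
  let order := (pvBFS dag_succ (pvSuccTotal dag_succ + 2) [start] [] []).2
  let reach_wo : PySem.Dict String (PySem.Set String) :=
    order.foldl (fun rd d => rd.insert d (pvReachAvoid dag_succ start d)) PySem.Dict.empty
  let idom :=
    (order.drop 1).foldl
      (fun acc n =>
        let dom_n := order.filter fun d => !(PySem.Set.contains (reach_wo.getD d []) n)
        acc.insert n
          (dom_n.reverse.find? fun d =>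
            d != n &&
              dom_n.all fun c =>
                c == n || c == d || !(PySem.Set.contains (reach_wo.getD c []) d)))
      ((PySem.Dict.empty).insert start (none : Option String))
  idom.items

-- ===== PRECONDITION & SPEC =====
def Spec_build_dominance_tree (start : String) (dag_nodes : List String) (dag_succ : List (String × List String)) (out : List (String × Option String)) : Prop := out = build_dominance_tree_alt start dag_nodes dag_succ
instance (start : String) (dag_nodes : List String) (dag_succ : List (String × List String)) (out : List (String × Option String)) : Decidable (Spec_build_dominance_tree start dag_nodes dag_succ out) := by unfold Spec_build_dominance_tree; infer_instance

-- ===== CLAIM (what is proved, stated in full; the proofs are below) =====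
def Claim_equal_build_dominance_tree : Prop := ∀ (start : String) (dag_nodes : List String) (dag_succ : List (String × List String)), Dom_build_dominance_tree start dag_nodes dag_succ → Spec_build_dominance_tree start dag_nodes dag_succ (build_dominance_tree start dag_nodes dag_succ)

-- ===== LEMMAS AND PROOFS =====

-- ===== LEMMAS AND PROOFS =====

-- ---------- paths and the dominance relation ----------

inductive pvPath (ds : List (String × List String)) (s : String) : List String → String → Prop
  | nil : pvPath ds s [s] s
  | cons {l : List String} {v w : String} :
      pvPath ds s l v → w ∈ pvSucc ds v → pvPath ds s (l ++ [w]) w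

def pvReach (ds : List (String × List String)) (s : String) (n : String) : Prop :=
  ∃ l, pvPath ds s l n

def pvRelDom (ds : List (String × List String)) (s : String) (d n : String) : Prop :=
  ∀ l, pvPath ds s l n → d ∈ l

theorem pvPath_end_mem {ds : List (String × List String)} {s : String} {l : List String}
    {n : String} (h : pvPath ds s l n) : n ∈ l := by
  induction h with
  | nil => simp
  | cons h hw ih => simp

theorem pvPath_start_mem {ds : List (String × List String)} {s : String} {l : List String}
    {n : String} (h : pvPath ds s l n) : s ∈ l := by
  induction h with
  | nil => simp
  | cons h hw ih => exact List.mem_append_left _ ih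

theorem pvPath_getLast {ds : List (String × List String)} {s : String} {l : List String}
    {n : String} (h : pvPath ds s l n) : l.getLast? = some n := by
  induction h with
  | nil => rfl
  | cons h hw ih => simp

theorem pvPath_prefix {ds : List (String × List String)} {s : String} {l : List String}
    {n x : String} (h : pvPath ds s l n) (hx : x ∈ l) :
    ∃ l₁ l₂, l = l₁ ++ x :: l₂ ∧ pvPath ds s (l₁ ++ [x]) x := by
  induction h with
  | nil =>
    simp only [List.mem_singleton] at hx
    subst hx
    exact ⟨[], [], rfl, pvPath.nil⟩
  | @cons l v w h hw ih =>
    rcases List.mem_append.mp hx with hx' | hx'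
    · obtain ⟨l₁, l₂, heq, hp⟩ := ih hx'
      exact ⟨l₁, l₂ ++ [w], by simp [heq], hp⟩
    · simp only [List.mem_singleton] at hx'
      subst hx'
      exact ⟨l, [], rfl, pvPath.cons h hw⟩

theorem pvReach_start (ds : List (String × List String)) (s : String) : pvReach ds s s :=
  ⟨[s], pvPath.nil⟩

theorem pvReach_step {ds : List (String × List String)} {s v w : String}
    (h : pvReach ds s v) (hw : w ∈ pvSucc ds v) : pvReach ds s w := by
  obtain ⟨l, hl⟩ := h
  exact ⟨l ++ [w], pvPath.cons hl hw⟩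

theorem pvRelDom_start (ds : List (String × List String)) (s n : String) : pvRelDom ds s s n :=
  fun _ h => pvPath_start_mem h

theorem pvRelDom_start_iff (ds : List (String × List String)) (s d : String) :
    pvRelDom ds s d s ↔ d = s := by
  constructor
  · intro h
    have := h [s] pvPath.nil
    simpa using this
  · rintro rfl
    exact pvRelDom_start _ _ _

theorem pvRelDom_reach {ds : List (String × List String)} {s d n : String}
    (h : pvRelDom ds s d n) (hn : pvReach ds s n) : pvReach ds s d := by
  obtain ⟨l, hl⟩ := hn
  obtain ⟨l₁, l₂, _, hp⟩ := pvPath_prefix hl (h l hl)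
  exact ⟨_, hp⟩

theorem pvRelDom_step {ds : List (String × List String)} {s c n v : String}
    (h : pvRelDom ds s c n) (hcn : c ≠ n) (hv : n ∈ pvSucc ds v) : pvRelDom ds s c v := by
  intro l hl
  have := h (l ++ [n]) (pvPath.cons hl hv)
  rcases List.mem_append.mp this with h' | h'
  · exact h'
  · simp only [List.mem_singleton] at h'
    exact absurd h' hcn

theorem pvRelDom_antisymm {ds : List (String × List String)} {s d₁ d₂ : String}
    (h₁ : pvRelDom ds s d₁ d₂) (h₂ : pvRelDom ds s d₂ d₁) (hr : pvReach ds s d₁) :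
    d₁ = d₂ := by
  by_contra hne
  have key : ∀ (k : Nat) (l : List String) (x : String), pvPath ds s l x → l.length ≤ k →
      (x = d₁ ∨ x = d₂) → False := by
    intro k
    induction k with
    | zero =>
      intro l x hp hlen _
      have := pvPath_end_mem hp
      cases l with
      | nil => simp at this
      | cons a t => simp at hlen
    | succ k ih =>
      intro l x hp hlen hx
      rcases hx with rfl | rfl
      · obtain ⟨l₁, l₂, heq, hpref⟩ := pvPath_prefix hp (h₂ l hp)
        cases l₂ with
        | nil =>
          have hlast := pvPath_getLast hp
          rw [heq] at hlast
          simp at hlast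
          exact hne hlast.symm
        | cons a l₂' =>
          apply ih (l₁ ++ [d₂]) d₂ hpref ?_ (Or.inr rfl)
          have : l.length = l₁.length + 1 + (l₂'.length + 1) := by simp [heq]; omega
          simp
          omega
      · obtain ⟨l₁, l₂, heq, hpref⟩ := pvPath_prefix hp (h₁ l hp)
        cases l₂ with
        | nil =>
          have hlast := pvPath_getLast hp
          rw [heq] at hlast
          simp at hlast
          exact hne hlast
        | cons a l₂' =>
          apply ih (l₁ ++ [d₁]) d₁ hpref ?_ (Or.inl rfl)
          have : l.length = l₁.length + 1 + (l₂'.length + 1) := by simp [heq]; omega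
          simp
          omega
  obtain ⟨l, hl⟩ := hr
  exact key l.length l d₁ hl le_rfl (Or.inl rfl)

-- ---------- the BFS loop (shared by both ports) ----------

def pvCap (ds : List (String × List String)) (visited : List String) : Nat :=
  ((ds.filter (fun p => !(visited.contains p.1))).map (fun p => p.2.length)).sum

theorem pvCap_cons (p : String × List String) (t : List (String × List String))
    (vis : List String) :
    pvCap (p :: t) vis = (if p.1 ∈ vis then 0 else p.2.length) + pvCap t vis := by
  by_cases h : p.1 ∈ vis
  · simp [pvCap, List.filter_cons, h]
  · simp [pvCap, List.filter_cons, h]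

theorem pvCap_empty (ds : List (String × List String)) : pvCap ds [] = pvSuccTotal ds := by
  simp [pvCap, pvSuccTotal]

theorem pvCap_mono {ds : List (String × List String)} {vis vis' : List String}
    (h : ∀ x, x ∈ vis → x ∈ vis') : pvCap ds vis' ≤ pvCap ds vis := by
  induction ds with
  | nil => simp [pvCap]
  | cons p t ih =>
    rw [pvCap_cons, pvCap_cons]
    have : (if p.1 ∈ vis' then 0 else p.2.length) ≤ (if p.1 ∈ vis then 0 else p.2.length) := by
      by_cases h1 : p.1 ∈ vis
      · simp [h1, h _ h1]
      · simp [h1]; split <;> omega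
    omega

theorem pvCap_add {ds : List (String × List String)} {visited : List String} {v : String}
    (hv : v ∉ visited) :
    (pvSucc ds v).length + pvCap ds (visited ++ [v]) ≤ pvCap ds visited := by
  have key : ∀ (l : List (String × List String)) (vis : List String) (v : String),
      v ∉ vis →
      ((PySem.Dict.mk l).getD v []).length + pvCap l (vis ++ [v]) ≤ pvCap l vis := by
    intro l
    induction l with
    | nil => intro vis v _; simp [pvCap, PySem.Dict.getD, PySem.Dict.get?]
    | cons p t ih =>
      intro vis v hv
      obtain ⟨k, lv⟩ := p
      have hget : (PySem.Dict.mk ((k, lv) :: t)).getD v [] =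
          if k == v then lv else (PySem.Dict.mk t).getD v [] := by
        rw [PySem.Dict.getD_eq_get?_getD, PySem.Dict.get?_mk_cons]
        by_cases h : k == v
        · simp [h]
        · simp [h, PySem.Dict.getD_eq_get?_getD]
      rw [pvCap_cons, pvCap_cons, hget]
      by_cases hk : k = v
      · subst hk
        have h1 : (k ∈ vis ++ [k]) := List.mem_append_right _ (List.mem_singleton.mpr rfl)
        have hmono : pvCap t (vis ++ [k]) ≤ pvCap t vis :=
          pvCap_mono (fun x hx => List.mem_append_left _ hx)
        simp only [beq_self_eq_true, if_true, h1, hv, if_false]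
        omega
      · have hbe : (k == v) = false := by simp [hk]
        have hmem : (k ∈ vis ++ [v]) ↔ k ∈ vis := by
          simp [List.mem_append, hk]
        have := ih vis v hv
        rw [hbe]
        simp only [Bool.false_eq_true, if_false, hmem]
        by_cases h3 : k ∈ vis
        · simp only [h3, if_true]; omega
        · simp only [h3, if_false]; omega
  exact key ds visited v hv

def pvBFSInv (ds : List (String × List String)) (s : String)
    (q : List String) (visited : PySem.Set String) (topo : List String) : Prop :=
  List.Nodup visited ∧ List.Nodup topo ∧ (∀ x, x ∈ visited ↔ x ∈ topo) ∧
  (∀ x ∈ q, pvReach ds s x) ∧ (∀ x ∈ visited, pvReach ds s x) ∧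
  (∀ v ∈ visited, ∀ w ∈ pvSucc ds v, w ∈ visited ∨ w ∈ q) ∧
  (s ∈ visited ∨ s ∈ q)

theorem pvBFS_spec (ds : List (String × List String)) (s : String) :
    ∀ (fuel : Nat) (q : List String) (visited : PySem.Set String) (topo : List String),
      pvBFSInv ds s q visited topo →
      q.length + pvCap ds visited < fuel →
      (∀ x, x ∈ (pvBFS ds fuel q visited topo).1 ↔ x ∈ (pvBFS ds fuel q visited topo).2) ∧
      List.Nodup (pvBFS ds fuel q visited topo).2 ∧
      (∀ x ∈ (pvBFS ds fuel q visited topo).1, pvReach ds s x) ∧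
      (∀ v ∈ (pvBFS ds fuel q visited topo).1, ∀ w ∈ pvSucc ds v,
        w ∈ (pvBFS ds fuel q visited topo).1) ∧
      s ∈ (pvBFS ds fuel q visited topo).1 := by
  intro fuel
  induction fuel with
  | zero => intro q visited topo _ hm; exact absurd hm (Nat.not_lt_zero _)
  | succ fuel ih =>
    intro q visited topo hinv hm
    obtain ⟨hnv, hnt, hvt, hqr, hvr, hcl, hs⟩ := hinv
    cases q with
    | nil =>
      simp only [pvBFS]
      refine ⟨hvt, hnt, hvr, ?_, ?_⟩
      · intro v hv w hw
        rcases hcl v hv w hw with h | h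
        · exact h
        · simp at h
      · rcases hs with h | h
        · exact h
        · simp at h
    | cons v q' =>
      by_cases hvmem : v ∈ visited
      · have hstep : pvBFS ds (fuel + 1) (v :: q') visited topo =
            pvBFS ds fuel q' visited topo := by
          simp only [pvBFS, if_pos hvmem]
        rw [hstep]
        apply ih q' visited topo
        · refine ⟨hnv, hnt, hvt, fun x hx => hqr x (List.mem_cons_of_mem _ hx), hvr, ?_, ?_⟩
          · intro u hu w hw
            rcases hcl u hu w hw with h | h
            · exact Or.inl h
            · rcases List.mem_cons.mp h with rfl | h'
              · exact Or.inl hvmem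
              · exact Or.inr h'
          · rcases hs with h | h
            · exact Or.inl h
            · rcases List.mem_cons.mp h with rfl | h'
              · exact Or.inl hvmem
              · exact Or.inr h'
        · simp only [List.length_cons] at hm
          omega
      · have hadd : PySem.Set.add visited v = visited ++ [v] :=
          PySem.Set.add_of_not_mem hvmem
        have hstep : pvBFS ds (fuel + 1) (v :: q') visited topo =
            pvBFS ds fuel
              (q' ++ (pvSucc ds v).filter
                (fun w => !(PySem.Set.contains (visited ++ [v]) w)))
              (visited ++ [v]) (topo ++ [v]) := by
          simp only [pvBFS, if_neg hvmem, hadd]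
        rw [hstep]
        have hvtopo : v ∉ topo := fun h => hvmem ((hvt v).mpr h)
        have hreachv : pvReach ds s v := hqr v List.mem_cons_self
        apply ih
        · refine ⟨?_, ?_, ?_, ?_, ?_, ?_, ?_⟩
          · simp only [List.nodup_append, List.nodup_cons, List.not_mem_nil,
              not_false_eq_true, List.nodup_nil, and_self, List.mem_cons, or_false, ne_eq,
              forall_eq, true_and]
            exact ⟨hnv, fun a ha h => hvmem (h ▸ ha)⟩
          · simp only [List.nodup_append, List.nodup_cons, List.not_mem_nil,
              not_false_eq_true, List.nodup_nil, and_self, List.mem_cons, or_false, ne_eq,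
              forall_eq, true_and]
            exact ⟨hnt, fun a ha h => hvtopo (h ▸ ha)⟩
          · intro x
            simp only [List.mem_append, List.mem_singleton]
            rw [hvt x]
          · intro x hx
            rcases List.mem_append.mp hx with h | h
            · exact hqr x (List.mem_cons_of_mem _ h)
            · have := List.mem_filter.mp h
              exact pvReach_step hreachv this.1
          · intro x hx
            rcases List.mem_append.mp hx with h | h
            · exact hvr x h
            · simp only [List.mem_singleton] at h
              rw [h]; exact hreachv
          · intro u hu w hw
            rcases List.mem_append.mp hu with h | h
            · rcases hcl u h w hw with h' | h'
              · exact Or.inl (List.mem_append_left _ h')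
              · rcases List.mem_cons.mp h' with rfl | h''
                · exact Or.inl (List.mem_append_right _ (List.mem_singleton.mpr rfl))
                · exact Or.inr (List.mem_append_left _ h'')
            · simp only [List.mem_singleton] at h
              rw [h] at hw
              by_cases hwm : w ∈ visited ++ [v]
              · exact Or.inl hwm
              · refine Or.inr (List.mem_append_right _ (List.mem_filter.mpr ⟨hw, ?_⟩))
                simp [hwm]
          · rcases hs with h | h
            · exact Or.inl (List.mem_append_left _ h)
            · rcases List.mem_cons.mp h with rfl | h'
              · exact Or.inl (List.mem_append_right _ (List.mem_singleton.mpr rfl))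
              · exact Or.inr (List.mem_append_left _ h')
        · have h1 : ((pvSucc ds v).filter
              (fun w => !(PySem.Set.contains (visited ++ [v]) w))).length ≤
              (pvSucc ds v).length := List.length_filter_le _ _
          have h2 := pvCap_add (ds := ds) (visited := visited) (v := v) hvmem
          simp only [List.length_append, List.length_cons] at hm ⊢
          omega

theorem pvBFS_topo_prefix (ds : List (String × List String)) :
    ∀ (fuel : Nat) (q : List String) (visited : PySem.Set String) (topo : List String),
      ∃ t, (pvBFS ds fuel q visited topo).2 = topo ++ t := by
  intro fuel
  induction fuel with
  | zero => intro q visited topo; exact ⟨[], by simp [pvBFS]⟩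
  | succ fuel ih =>
    intro q visited topo
    cases q with
    | nil => exact ⟨[], by simp [pvBFS]⟩
    | cons v q' =>
      by_cases hvmem : v ∈ visited
      · obtain ⟨t, ht⟩ := ih q' visited topo
        exact ⟨t, by simp only [pvBFS, if_pos hvmem]; exact ht⟩
      · obtain ⟨t, ht⟩ := ih (q' ++ (pvSucc ds v).filter
            (fun w => !(PySem.Set.contains (PySem.Set.add visited v) w)))
            (PySem.Set.add visited v) (topo ++ [v])
        refine ⟨[v] ++ t, ?_⟩
        simp only [pvBFS, if_neg hvmem]
        rw [ht]
        simp

def pvTopo (ds : List (String × List String)) (s : String) : List String :=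
  (pvBFS ds (pvSuccTotal ds + 2) [s] [] []).2

def pvVis (ds : List (String × List String)) (s : String) : PySem.Set String :=
  (pvBFS ds (pvSuccTotal ds + 2) [s] [] []).1

theorem pvTopo_master (ds : List (String × List String)) (s : String) :
    (∀ x, x ∈ pvVis ds s ↔ x ∈ pvTopo ds s) ∧ List.Nodup (pvTopo ds s) ∧
      (∀ x ∈ pvVis ds s, pvReach ds s x) ∧
      (∀ v ∈ pvVis ds s, ∀ w ∈ pvSucc ds v, w ∈ pvVis ds s) ∧ s ∈ pvVis ds s := by
  have h := pvBFS_spec ds s (pvSuccTotal ds + 2) [s] [] []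
    ⟨List.nodup_nil, List.nodup_nil, by simp, ?_, by simp, by simp, Or.inr List.mem_cons_self⟩ ?_
  · exact ⟨h.1, h.2.1, h.2.2.1, h.2.2.2.1, h.2.2.2.2⟩
  · intro x hx
    simp only [List.mem_singleton] at hx
    rw [hx]
    exact pvReach_start ds s
  · have := pvCap_empty ds
    simp only [List.length_cons, List.length_nil]
    omega

theorem pvVis_iff_topo (ds : List (String × List String)) (s : String) :
    ∀ x, x ∈ pvVis ds s ↔ x ∈ pvTopo ds s := by
  exact (pvTopo_master ds s).1

theorem pvTopo_nodup (ds : List (String × List String)) (s : String) :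
    List.Nodup (pvTopo ds s) := by
  exact (pvTopo_master ds s).2.1

theorem pvMem_topo_iff_reach (ds : List (String × List String)) (s : String) (x : String) :
    x ∈ pvTopo ds s ↔ pvReach ds s x := by
  obtain ⟨hiff, hnd, hreach, hcl, hsv⟩ := pvTopo_master ds s
  constructor
  · intro hx
    exact hreach x ((hiff x).mpr hx)
  · rintro ⟨l, hl⟩
    induction hl with
    | nil => exact (hiff s).mp hsv
    | @cons l v w hp hw ih =>
      exact (hiff w).mp (hcl v ((hiff v).mpr ih) w hw)

theorem pvTopo_eq_cons (ds : List (String × List String)) (s : String) :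
    pvTopo ds s = s :: (pvTopo ds s).drop 1 := by
  have h2 : pvSuccTotal ds + 2 = (pvSuccTotal ds + 1) + 1 := rfl
  have hne : s ∉ ([] : PySem.Set String) := List.not_mem_nil
  have hadd : PySem.Set.add [] s = [s] := by
    rw [PySem.Set.add_of_not_mem hne]
    rfl
  obtain ⟨t, ht⟩ := pvBFS_topo_prefix ds (pvSuccTotal ds + 1)
    ([] ++ (pvSucc ds s).filter (fun w => !(PySem.Set.contains (PySem.Set.add [] s) w)))
    (PySem.Set.add [] s) ([] ++ [s])
  have hstep : pvTopo ds s = [s] ++ t := by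
    unfold pvTopo
    rw [h2]
    simp only [pvBFS, if_neg hne]
    exact ht
  rw [hstep]
  rfl

theorem pvStart_not_mem_drop (ds : List (String × List String)) (s : String) :
    s ∉ (pvTopo ds s).drop 1 := by
  have h := pvTopo_nodup ds s
  rw [pvTopo_eq_cons ds s] at h
  exact (List.nodup_cons.mp h).1

theorem pvMem_drop_iff (ds : List (String × List String)) (s : String) (x : String) :
    x ∈ (pvTopo ds s).drop 1 ↔ x ∈ pvTopo ds s ∧ x ≠ s := by
  have hnd := pvStart_not_mem_drop ds s
  constructor
  · intro hx
    refine ⟨?_, ?_⟩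
    · rw [pvTopo_eq_cons ds s]
      exact List.mem_cons_of_mem _ hx
    · rintro rfl
      exact hnd hx
  · rintro ⟨hx, hne⟩
    rw [pvTopo_eq_cons ds s] at hx
    rcases List.mem_cons.mp hx with h | h
    · exact absurd h hne
    · exact h

-- ---------- the predecessor table of port A ----------

def pvPredD (ds : List (String × List String)) (s : String) : PySem.Dict String (List String) :=
  (pvTopo ds s).foldl
    (fun d v =>
      ((pvSucc ds v).filter (fun w => PySem.Set.contains (pvVis ds s) w)).foldl
        (fun d w => d.modify w [] (· ++ [v])) d)
    PySem.Dict.empty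

def pvPred (ds : List (String × List String)) (s : String) (n : String) : List String :=
  (pvPredD ds s).getD n []

theorem pvFoldl_nested_modify (l : List String) (ws : String → List String)
    (d0 : PySem.Dict String (List String)) :
    l.foldl (fun d v => (ws v).foldl (fun d w => d.modify w [] (· ++ [v])) d) d0 =
      (l.flatMap (fun v => (ws v).map (fun w => (w, v)))).foldl
        (fun d p => d.modify p.1 [] (· ++ [p.2])) d0 := by
  induction l generalizing d0 with
  | nil => rfl
  | cons v t ih =>
    simp only [List.foldl_cons, List.flatMap_cons, List.foldl_append, List.foldl_map]
    exact ih _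

theorem pvPred_eq (ds : List (String × List String)) (s : String) (n : String) :
    pvPred ds s n =
      (((pvTopo ds s).flatMap
            (fun v => ((pvSucc ds v).filter
                (fun w => PySem.Set.contains (pvVis ds s) w)).map (fun w => (w, v)))).filter
          (fun p => p.1 == n)).map (·.2) := by
  unfold pvPred pvPredD
  rw [pvFoldl_nested_modify]
  rw [PySem.Dict.getD_foldl_modify_append]
  simp [PySem.Dict.getD_empty]

theorem pvPred_mem (ds : List (String × List String)) (s : String) (n v : String) :
    v ∈ pvPred ds s n ↔ v ∈ pvTopo ds s ∧ n ∈ pvSucc ds v ∧ n ∈ pvTopo ds s := by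
  rw [pvPred_eq]
  simp only [List.mem_map, List.mem_filter, List.mem_flatMap,
    PySem.Set.contains_eq_listContains, List.contains_iff_mem, beq_iff_eq, decide_eq_true_eq,
    pvVis_iff_topo ds s]
  constructor
  · rintro ⟨⟨w, v'⟩, ⟨⟨u, hu, hw⟩, hn⟩, rfl⟩
    obtain ⟨w', ⟨hw1, hw2⟩, heq⟩ := hw
    obtain ⟨rfl, rfl⟩ := Prod.mk.injEq .. ▸ heq
    dsimp only at hn ⊢
    subst hn
    exact ⟨hu, hw1, hw2⟩
  · rintro ⟨hv, hn, hnt⟩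
    exact ⟨(n, v), ⟨⟨v, hv, n, ⟨hn, hnt⟩, rfl⟩, rfl⟩, rfl⟩--ENDPROOF

theorem pvPred_ne_nil {ds : List (String × List String)} {s : String} {n : String}
    (hn : n ∈ (pvTopo ds s).drop 1) : pvPred ds s n ≠ [] := by
  obtain ⟨hnt, hns⟩ := (pvMem_drop_iff ds s n).mp hn
  obtain ⟨l, hl⟩ := (pvMem_topo_iff_reach ds s n).mp hnt
  cases hl with
  | nil => exact absurd rfl hns
  | @cons l' v _ hp hw =>
    have hv : v ∈ pvTopo ds s := (pvMem_topo_iff_reach ds s v).mpr ⟨l', hp⟩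
    have : v ∈ pvPred ds s n := (pvPred_mem ds s n v).mpr ⟨hv, hw, hnt⟩
    intro hnil
    rw [hnil] at this
    simp at this

-- ---------- port B's per-node BFS ----------

theorem pvSucc_subset_flatMap {ds : List (String × List String)} {v x : String}
    (h : x ∈ pvSucc ds v) : x ∈ ds.flatMap (fun p => p.2) := by
  unfold pvSucc at h
  induction ds with
  | nil => simp [PySem.Dict.getD, PySem.Dict.get?] at h
  | cons p t ih =>
    rw [PySem.Dict.getD_eq_get?_getD, PySem.Dict.get?_mk_cons] at h
    simp only [List.flatMap_cons, List.mem_append]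
    by_cases hk : p.1 == v
    · rw [if_pos hk] at h
      simp only [Option.getD_some] at h
      exact Or.inl h
    · rw [if_neg hk] at h
      rw [← PySem.Dict.getD_eq_get?_getD] at h
      exact Or.inr (ih h)

theorem pvFlatMap_length (ds : List (String × List String)) :
    (ds.flatMap (fun p => p.2)).length = pvSuccTotal ds := by
  unfold pvSuccTotal
  induction ds with
  | nil => rfl
  | cons p t ih => simp [List.flatMap_cons, ih]

-- one round of Source B's inner loops: the new elements are appended to both reach and nxt
theorem pvRRound (ds : List (String × List String)) (d : String) (fr : List String) :
    ∀ st0 : PySem.Set String × List String,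
      List.Nodup st0.1 →
      ∃ t,
        (fr.foldl
              (fun st v =>
                (pvSucc ds v).foldl
                  (fun st w =>
                    if w ≠ d ∧ ¬(PySem.Set.contains st.1 w) then
                      (PySem.Set.add st.1 w, st.2 ++ [w])
                    else st)
                  st)
              st0) =
            (st0.1 ++ t, st0.2 ++ t) ∧
          List.Nodup (st0.1 ++ t) ∧
          (∀ x ∈ t, x ≠ d ∧ ∃ v ∈ fr, x ∈ pvSucc ds v) ∧
          (∀ v ∈ fr, ∀ w ∈ pvSucc ds v, w ≠ d → w ∈ st0.1 ++ t) := by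
  have inner : ∀ (v : String) (ws : List String) (st0 : PySem.Set String × List String),
      List.Nodup st0.1 →
      ∃ t,
        (ws.foldl
              (fun st w =>
                if w ≠ d ∧ ¬(PySem.Set.contains st.1 w) then
                  (PySem.Set.add st.1 w, st.2 ++ [w])
                else st)
              st0) =
            (st0.1 ++ t, st0.2 ++ t) ∧
          List.Nodup (st0.1 ++ t) ∧ (∀ x ∈ t, x ≠ d ∧ x ∈ ws) ∧
          (∀ w ∈ ws, w ≠ d → w ∈ st0.1 ++ t) := by
    intro v ws
    induction ws with
    | nil => intro st0 hnd; exact ⟨[], by simp, by simpa using hnd, by simp, by simp⟩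
    | cons w ws' ih =>
      intro st0 hnd
      simp only [List.foldl_cons]
      by_cases hc : w ≠ d ∧ ¬(PySem.Set.contains st0.1 w)
      · rw [if_pos hc]
        have hwmem : w ∉ st0.1 := by
          have := hc.2
          simpa [PySem.Set.contains_eq_listContains, List.contains_iff_mem] using this
        have hadd : PySem.Set.add st0.1 w = st0.1 ++ [w] := PySem.Set.add_of_not_mem hwmem
        rw [hadd]
        have hnd' : List.Nodup (st0.1 ++ [w]) := by
          simp only [List.nodup_append, List.nodup_cons, List.not_mem_nil, not_false_eq_true,
            List.nodup_nil, and_self, List.mem_cons, or_false, ne_eq, forall_eq, true_and]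
          exact ⟨hnd, fun a ha h => hwmem (h ▸ ha)⟩
        obtain ⟨t, heq, hnd2, hmem, hall⟩ := ih (st0.1 ++ [w], st0.2 ++ [w]) hnd'
        refine ⟨[w] ++ t, ?_, ?_, ?_, ?_⟩
        · rw [heq]; simp
        · simpa using hnd2
        · intro x hx
          rcases List.mem_append.mp hx with h | h
          · simp only [List.mem_singleton] at h
            exact ⟨h ▸ hc.1, h ▸ List.mem_cons_self⟩
          · obtain ⟨h1, h2⟩ := hmem x h
            exact ⟨h1, List.mem_cons_of_mem _ h2⟩
        · intro w' hw' hwd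
          rcases List.mem_cons.mp hw' with rfl | h
          · have : w' ∈ (st0.1 ++ [w']) ++ t := by simp
            simpa using this
          · have := hall w' h hwd
            simpa using this
      · rw [if_neg hc]
        obtain ⟨t, heq, hnd2, hmem, hall⟩ := ih st0 hnd
        refine ⟨t, heq, hnd2, ?_, ?_⟩
        · intro x hx
          obtain ⟨h1, h2⟩ := hmem x hx
          exact ⟨h1, List.mem_cons_of_mem _ h2⟩
        · intro w' hw' hwd
          rcases List.mem_cons.mp hw' with rfl | h
          · have hwin : w' ∈ st0.1 := by
              by_contra hno
              exact hc ⟨hwd, by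
                simpa [PySem.Set.contains_eq_listContains, List.contains_iff_mem] using hno⟩
            exact List.mem_append_left _ hwin
          · exact hall w' h hwd
  induction fr with
  | nil => intro st0 hnd; exact ⟨[], by simp, by simpa using hnd, by simp, by simp⟩
  | cons v fr' ih =>
    intro st0 hnd
    simp only [List.foldl_cons]
    obtain ⟨t1, heq1, hnd1, hmem1, hall1⟩ := inner v (pvSucc ds v) st0 hnd
    rw [heq1]
    obtain ⟨t2, heq2, hnd2, hmem2, hall2⟩ := ih (st0.1 ++ t1, st0.2 ++ t1) hnd1
    refine ⟨t1 ++ t2, ?_, ?_, ?_, ?_⟩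
    · rw [heq2]; simp
    · simpa [List.append_assoc] using hnd2
    · intro x hx
      rcases List.mem_append.mp hx with h | h
      · obtain ⟨h1, h2⟩ := hmem1 x h
        exact ⟨h1, v, List.mem_cons_self, h2⟩
      · obtain ⟨h1, v', hv', h2⟩ := hmem2 x h
        exact ⟨h1, v', List.mem_cons_of_mem _ hv', h2⟩
    · intro v' hv' w hw hwd
      rcases List.mem_cons.mp hv' with rfl | h
      · have := hall1 w hw hwd
        rcases List.mem_append.mp this with h' | h'
        · exact List.mem_append_left _ h'
        · exact List.mem_append_right _ (List.mem_append_left _ h')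
      · have := hall2 v' h w hw hwd
        simpa [List.append_assoc] using this

theorem pvRLoop_nil (ds : List (String × List String)) (d : String) (fuel : Nat)
    (reach : PySem.Set String) : pvRLoop ds d fuel reach [] = reach := by
  cases fuel <;> rfl

theorem pvRLoop_spec (ds : List (String × List String)) (s d : String) :
    ∀ (fuel : Nat) (reach : PySem.Set String) (frontier : List String),
      List.Nodup reach →
      (∀ x ∈ frontier, x ∈ reach) →
      (∀ x ∈ reach, x ≠ d ∧ ∃ l, pvPath ds s l x ∧ d ∉ l) →
      (∀ v ∈ reach, v ∉ frontier → ∀ w ∈ pvSucc ds v, w ≠ d → w ∈ reach) →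
      (∀ x ∈ reach, x = s ∨ x ∈ ds.flatMap (fun p => p.2)) →
      pvSuccTotal ds + 2 ≤ fuel + reach.length →
      (∀ x ∈ reach, x ∈ pvRLoop ds d fuel reach frontier) ∧
      (∀ x ∈ pvRLoop ds d fuel reach frontier, x ≠ d ∧ ∃ l, pvPath ds s l x ∧ d ∉ l) ∧
      (∀ v ∈ pvRLoop ds d fuel reach frontier, ∀ w ∈ pvSucc ds v, w ≠ d →
        w ∈ pvRLoop ds d fuel reach frontier) := by
  intro fuel
  induction fuel with
  | zero =>
    intro reach frontier hnd _ _ _ hcar hbound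
    exfalso
    have hsub : ∀ x ∈ reach, x ∈ s :: ds.flatMap (fun p => p.2) := by
      intro x hx
      rcases hcar x hx with h | h
      · exact h ▸ List.mem_cons_self
      · exact List.mem_cons_of_mem _ h
    have hlen : reach.length ≤ 1 + pvSuccTotal ds := by
      have := (List.Nodup.subperm hnd hsub).length_le
      rw [List.length_cons, pvFlatMap_length] at this
      omega
    omega
  | succ fuel ih =>
    intro reach frontier hnd hfr hsound hclosure hcar hbound
    cases frontier with
    | nil =>
      rw [pvRLoop_nil]
      exact ⟨fun x hx => hx, hsound,
        fun v hv w hw hwd => hclosure v hv (by simp) w hw hwd⟩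
    | cons a fr' =>
      obtain ⟨t, heq, hndt, hmemt, hallt⟩ := pvRRound ds d (a :: fr') (reach, []) hnd
      have hrw : pvRLoop ds d (fuel + 1) reach (a :: fr') =
          pvRLoop ds d fuel (reach ++ t) ([] ++ t) := by
        have h0 : pvRLoop ds d (fuel + 1) reach (a :: fr') =
            pvRLoop ds d fuel
              (((a :: fr').foldl
                (fun st v =>
                  (pvSucc ds v).foldl
                    (fun st w =>
                      if w ≠ d ∧ ¬(PySem.Set.contains st.1 w) then
                        (PySem.Set.add st.1 w, st.2 ++ [w])
                      else st)
                    st)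
                (reach, ([] : List String)))).1
              (((a :: fr').foldl
                (fun st v =>
                  (pvSucc ds v).foldl
                    (fun st w =>
                      if w ≠ d ∧ ¬(PySem.Set.contains st.1 w) then
                        (PySem.Set.add st.1 w, st.2 ++ [w])
                      else st)
                    st)
                (reach, ([] : List String)))).2 := rfl
        rw [h0, heq]
      rw [List.nil_append] at hrw
      rw [hrw]
      cases t with
      | nil =>
        rw [pvRLoop_nil]
        have hcl' : ∀ v ∈ reach, ∀ w ∈ pvSucc ds v, w ≠ d → w ∈ reach := by
          intro v hv w hw hwd
          by_cases hvf : v ∈ a :: fr'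
          · have := hallt v hvf w hw hwd
            simpa using this
          · exact hclosure v hv hvf w hw hwd
        exact ⟨fun x hx => by simpa using hx, fun x hx => hsound x (by simpa using hx),
          fun v hv w hw hwd => by
            have := hcl' v (by simpa using hv) w hw hwd
            simpa using this⟩
      | cons b t' =>
        have hres := ih (reach ++ (b :: t')) (b :: t') hndt
          (fun x hx => List.mem_append_right _ hx)
          ?_ ?_ ?_ ?_
        · exact ⟨fun x hx => hres.1 x (List.mem_append_left _ hx), hres.2.1, hres.2.2⟩
        · intro x hx
          rcases List.mem_append.mp hx with h | h
          · exact hsound x h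
          · obtain ⟨hxd, v, hv, hxv⟩ := hmemt x h
            obtain ⟨hvd, l, hl, hdl⟩ := hsound v (hfr v hv)
            refine ⟨hxd, l ++ [x], pvPath.cons hl hxv, ?_⟩
            intro hmem
            rcases List.mem_append.mp hmem with h' | h'
            · exact hdl h'
            · simp only [List.mem_singleton] at h'
              exact hxd h'.symm
        · intro v hv hvt w hw hwd
          rcases List.mem_append.mp hv with h | h
          · by_cases hvf : v ∈ a :: fr'
            · exact hallt v hvf w hw hwd
            · exact List.mem_append_left _ (hclosure v h hvf w hw hwd)
          · exact absurd h hvt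
        · intro x hx
          rcases List.mem_append.mp hx with h | h
          · exact hcar x h
          · obtain ⟨_, v, _, hxv⟩ := hmemt x h
            exact Or.inr (pvSucc_subset_flatMap hxv)
        · have : (reach ++ (b :: t')).length = reach.length + t'.length + 1 := by
            simp only [List.length_append, List.length_cons]
            omega
          omega

theorem pvReachAvoid_iff (ds : List (String × List String)) (s d x : String) :
    x ∈ pvReachAvoid ds s d ↔ ∃ l, pvPath ds s l x ∧ d ∉ l := by
  unfold pvReachAvoid
  by_cases hsd : s ≠ d
  · rw [if_pos hsd]
    have hspec := pvRLoop_spec ds s d (pvSuccTotal ds + 2) [s] [s]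
      (by simp) (by simp)
      ?_ (by intro v hv hnv; simp at hv; exact absurd (by simp [hv]) hnv)
      (by intro x hx; simp at hx; exact Or.inl hx) (by omega)
    · constructor
      · intro hx
        exact (hspec.2.1 x hx).2
      · rintro ⟨l, hl, hdl⟩
        induction hl with
        | nil => exact hspec.1 s (by simp)
        | @cons l' v w hp hw ih2 =>
          have hdl' : d ∉ l' := fun h => hdl (List.mem_append_left _ h)
          have hwd : w ≠ d := by
            intro h
            exact hdl (List.mem_append_right _ (by simp [h]))
          exact hspec.2.2 v (ih2 hdl') w hw hwd
    · intro x hx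
      simp only [List.mem_singleton] at hx
      rw [hx]
      refine ⟨hsd, [s], pvPath.nil, ?_⟩
      simp only [List.mem_singleton]
      exact fun h => hsd h.symm
  · rw [if_neg hsd]
    push Not at hsd
    subst hsd
    rw [pvRLoop_nil]
    simp only [List.not_mem_nil, false_iff]
    rintro ⟨l, hl, hdl⟩
    exact hdl (pvPath_start_mem hl)

theorem pvNotReachAvoid_iff (ds : List (String × List String)) {s : String} (d : String)
    {n : String} (hn : pvReach ds s n) :
    n ∉ pvReachAvoid ds s d ↔ pvRelDom ds s d n := by
  constructor
  · intro hna l hl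
    by_contra hd
    exact hna ((pvReachAvoid_iff ds s d n).mpr ⟨l, hl, hd⟩)
  · intro hdom hna
    obtain ⟨l, hl, hdl⟩ := (pvReachAvoid_iff ds s d n).mp hna
    exact hdl (hdom l hl)

def pvRW (ds : List (String × List String)) (s : String) : PySem.Dict String (PySem.Set String) :=
  (pvTopo ds s).foldl (fun rd d => rd.insert d (pvReachAvoid ds s d)) PySem.Dict.empty

theorem pvRW_getD (ds : List (String × List String)) (s : String) (c : String) :
    (pvRW ds s).getD c [] =
      if c ∈ pvTopo ds s then pvReachAvoid ds s c else [] := by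
  unfold pvRW
  have hfresh : ∀ a ∈ pvTopo ds s, (PySem.Dict.empty : PySem.Dict String (PySem.Set String)).contains a = false := by
    intro a _
    exact PySem.Dict.contains_empty a
  have hnd : ((pvTopo ds s).map (fun d => d)).Nodup := by
    simpa using pvTopo_nodup ds s
  have hitems := PySem.Dict.items_foldl_insert_fresh (l := pvTopo ds s)
    (k := fun d => d) (v := fun d => pvReachAvoid ds s d)
    (d := PySem.Dict.empty) hfresh hnd
  have hkeys : ((pvTopo ds s).foldl
      (fun rd d => rd.insert d (pvReachAvoid ds s d)) PySem.Dict.empty).keys = pvTopo ds s := by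
    have := PySem.Dict.keys_foldl_insert (l := pvTopo ds s)
      (f := fun rd d => pvReachAvoid ds s d) (d := PySem.Dict.empty)
    rw [this]
    have : (PySem.Dict.empty : PySem.Dict String (PySem.Set String)).keys = [] := rfl
    rw [this]
    rw [PySem.Set.update_nil_left]
    exact PySem.Set.ofList_eq_self_of_nodup _ (pvTopo_nodup ds s)
  by_cases hc : c ∈ pvTopo ds s
  · rw [if_pos hc]
    apply PySem.Dict.getD_of_mem_items
    · rw [hitems]
      have hie : (PySem.Dict.empty : PySem.Dict String (PySem.Set String)).items = [] := rfl
      rw [hie, List.nil_append, List.mem_map]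
      exact ⟨c, hc, rfl⟩
    · rw [hkeys]
      exact pvTopo_nodup ds s
  · rw [if_neg hc]
    apply PySem.Dict.getD_of_not_contains
    rw [PySem.Dict.contains_eq_decide_mem_keys, hkeys]
    simpa using hc

-- ---------- port A's dataflow loop ----------

def pvInitDom (ds : List (String × List String)) (s : String) :
    PySem.Dict String (PySem.Set String) :=
  ((pvTopo ds s).drop 1).foldl (fun d n => d.insert n (PySem.Set.ofList (pvTopo ds s)))
    ((PySem.Dict.empty).insert s (PySem.Set.ofList [s]))

def pvResDom (ds : List (String × List String)) (s : String) :
    PySem.Dict String (PySem.Set String) :=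
  pvLoopA (fun n => (pvPredD ds s).getD n []) ((pvTopo ds s).drop 1)
    ((pvTopo ds s).length * (pvTopo ds s).length + 2) (pvInitDom ds s)

def pvOKDom (ds : List (String × List String)) (s : String)
    (dom : PySem.Dict String (PySem.Set String)) : Prop :=
  dom.getD s [] = [s] ∧
  ∀ n ∈ (pvTopo ds s).drop 1,
    List.Nodup (dom.getD n []) ∧
    (∀ x ∈ dom.getD n [], x ∈ pvTopo ds s) ∧
    (∀ d, pvRelDom ds s d n → d ∈ dom.getD n []) ∧
    (∀ x ∈ pvNewDom dom (pvPred ds s n) n, x ∈ dom.getD n [])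

theorem pvOKDom_getD {ds : List (String × List String)} {s : String}
    {dom : PySem.Dict String (PySem.Set String)} (h : pvOKDom ds s dom) {p : String}
    (hp : p ∈ pvTopo ds s) :
    List.Nodup (dom.getD p []) ∧ (∀ x ∈ dom.getD p [], x ∈ pvTopo ds s) ∧
      (∀ d, pvRelDom ds s d p → d ∈ dom.getD p []) := by
  by_cases hps : p = s
  · subst hps
    rw [h.1]
    refine ⟨List.nodup_cons.mpr ⟨List.not_mem_nil, List.nodup_nil⟩, ?_, ?_⟩
    · intro x hx
      simp only [List.mem_singleton] at hx
      rw [hx]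
      exact hp
    · intro d hd
      have := (pvRelDom_start_iff ds p d).mp hd
      simp [this]
  · have hpd : p ∈ (pvTopo ds s).drop 1 := (pvMem_drop_iff ds s p).mpr ⟨hp, hps⟩
    obtain ⟨h1, h2, h3, _⟩ := h.2 p hpd
    exact ⟨h1, h2, h3⟩

theorem pvMem_foldl_inter {g : String → PySem.Set String} {ps : List String}
    {s0 : PySem.Set String} {x : String} :
    x ∈ ps.foldl (fun s p => PySem.Set.inter s (g p)) s0 ↔ x ∈ s0 ∧ ∀ p ∈ ps, x ∈ g p := by
  induction ps generalizing s0 with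
  | nil => simp
  | cons p t ih =>
    simp only [List.foldl_cons]
    rw [ih]
    simp only [PySem.Set.mem_inter, List.forall_mem_cons]
    tauto

theorem pvNodup_foldl_inter {g : String → PySem.Set String} {ps : List String}
    {s0 : PySem.Set String} (h : List.Nodup s0) :
    List.Nodup (ps.foldl (fun s p => PySem.Set.inter s (g p)) s0) := by
  induction ps generalizing s0 with
  | nil => exact h
  | cons p t ih =>
    simp only [List.foldl_cons]
    exact ih (PySem.Set.nodup_inter _ _ h)

theorem pvMem_newDom {dom : PySem.Dict String (PySem.Set String)} {preds : List String}
    {n x : String} (hne : preds ≠ []) :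
    x ∈ pvNewDom dom preds n ↔ (x ∈ (dom.getD (preds.headD "") []) ∧ ∀ p ∈ preds, x ∈ dom.getD p []) ∨ x = n := by
  cases preds with
  | nil => exact absurd rfl hne
  | cons p ps =>
    simp only [pvNewDom, PySem.Set.mem_union, pvMem_foldl_inter, List.headD_cons,
      List.forall_mem_cons, List.mem_singleton]
    tauto

theorem pvNewDom_mono {dom dom' : PySem.Dict String (PySem.Set String)} {preds : List String}
    {n : String} (h : ∀ p ∈ preds, ∀ x ∈ dom'.getD p [], x ∈ dom.getD p []) :
    ∀ x ∈ pvNewDom dom' preds n, x ∈ pvNewDom dom preds n := by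
  intro x hx
  cases preds with
  | nil => exact hx
  | cons p ps =>
    rw [pvMem_newDom (by simp)] at hx ⊢
    rcases hx with ⟨h1, h2⟩ | h1
    · refine Or.inl ⟨?_, ?_⟩
      · simp only [List.headD_cons] at h1 ⊢
        exact h p List.mem_cons_self x h1
      · intro p' hp'
        exact h p' hp' x (h2 p' hp')
    · exact Or.inr h1

def pvM (ds : List (String × List String)) (s : String)
    (dom : PySem.Dict String (PySem.Set String)) : Nat :=
  (((pvTopo ds s).drop 1).map (fun n => (dom.getD n []).length)).sum

theorem pvGetD_foldl_insert_const (l : List String) (c : PySem.Set String)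
    (d0 : PySem.Dict String (PySem.Set String)) (x : String) :
    (l.foldl (fun d n => d.insert n c) d0).getD x [] =
      if x ∈ l then c else d0.getD x [] := by
  induction l generalizing d0 with
  | nil => simp
  | cons a t ih =>
    simp only [List.foldl_cons]
    rw [ih]
    by_cases hx : x ∈ t
    · simp [hx]
    · rw [if_neg hx, PySem.Dict.getD_insert]
      by_cases hxa : x = a
      · simp [hxa]
      · simp [hxa, List.mem_cons, hx]

theorem pvNewDom_props {ds : List (String × List String)} {s : String}
    {dom : PySem.Dict String (PySem.Set String)} (h : pvOKDom ds s dom) {n : String}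
    (hn : n ∈ (pvTopo ds s).drop 1) :
    List.Nodup (pvNewDom dom (pvPred ds s n) n) ∧
      (∀ x ∈ pvNewDom dom (pvPred ds s n) n, x ∈ pvTopo ds s) ∧
      (∀ d, pvRelDom ds s d n → d ∈ pvNewDom dom (pvPred ds s n) n) := by
  have hne := pvPred_ne_nil hn
  have hnt : n ∈ pvTopo ds s := ((pvMem_drop_iff ds s n).mp hn).1
  refine ⟨?_, ?_, ?_⟩
  · cases hp : pvPred ds s n with
    | nil => exact absurd hp hne
    | cons p ps =>
      have hptopo : p ∈ pvTopo ds s :=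
        ((pvPred_mem ds s n p).mp (hp ▸ List.mem_cons_self)).1
      exact PySem.Set.nodup_union _ _
        (pvNodup_foldl_inter (pvOKDom_getD h hptopo).1)
  · intro x hx
    rw [pvMem_newDom hne] at hx
    rcases hx with ⟨h1, _⟩ | h1
    · cases hp : pvPred ds s n with
      | nil => exact absurd hp hne
      | cons p ps =>
        rw [hp] at h1
        simp only [List.headD_cons] at h1
        have hptopo : p ∈ pvTopo ds s :=
          ((pvPred_mem ds s n p).mp (hp ▸ List.mem_cons_self)).1
        exact (pvOKDom_getD h hptopo).2.1 x h1
    · rw [h1]; exact hnt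
  · intro d hd
    rw [pvMem_newDom hne]
    by_cases hdn : d = n
    · exact Or.inr hdn
    · refine Or.inl ⟨?_, ?_⟩
      · cases hp : pvPred ds s n with
        | nil => exact absurd hp hne
        | cons p ps =>
          simp only [List.headD_cons]
          have hpmem : p ∈ pvPred ds s n := hp ▸ List.mem_cons_self
          obtain ⟨hpt, hsucc, _⟩ := (pvPred_mem ds s n p).mp hpmem
          exact (pvOKDom_getD h hpt).2.2 d (pvRelDom_step hd hdn hsucc)
      · intro p hpmem
        obtain ⟨hpt, hsucc, _⟩ := (pvPred_mem ds s n p).mp hpmem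
        exact (pvOKDom_getD h hpt).2.2 d (pvRelDom_step hd hdn hsucc)

theorem pvPass_fold (ds : List (String × List String)) (s : String)
    (dom : PySem.Dict String (PySem.Set String)) (hdom : pvOKDom ds s dom) :
    ∀ (l : List String), (∀ n ∈ l, n ∈ (pvTopo ds s).drop 1) →
    ∀ (st0 : PySem.Dict String (PySem.Set String) × Bool),
      pvOKDom ds s st0.1 →
      (st0.2 = false → st0.1 = dom) →
      (∀ n ∈ (pvTopo ds s).drop 1, ((st0.1.getD n []).length ≤ (dom.getD n []).length)) →
      (st0.2 = true → pvM ds s st0.1 < pvM ds s dom) →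
      pvOKDom ds s (l.foldl
          (fun st n =>
            let new_dom := pvNewDom st.1 (pvPred ds s n) n
            if PySem.Set.equal new_dom (st.1.getD n []) then st
            else (st.1.insert n new_dom, true)) st0).1 ∧
        ((l.foldl
            (fun st n =>
              let new_dom := pvNewDom st.1 (pvPred ds s n) n
              if PySem.Set.equal new_dom (st.1.getD n []) then st
              else (st.1.insert n new_dom, true)) st0).2 = false →
          (l.foldl
              (fun st n =>
                let new_dom := pvNewDom st.1 (pvPred ds s n) n
                if PySem.Set.equal new_dom (st.1.getD n []) then st
                else (st.1.insert n new_dom, true)) st0).1 = dom ∧ st0.2 = false ∧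
            ∀ n ∈ l,
              PySem.Set.equal (pvNewDom dom (pvPred ds s n) n) (dom.getD n []) = true) ∧
        (∀ n ∈ (pvTopo ds s).drop 1,
          (((l.foldl
              (fun st n =>
                let new_dom := pvNewDom st.1 (pvPred ds s n) n
                if PySem.Set.equal new_dom (st.1.getD n []) then st
                else (st.1.insert n new_dom, true)) st0).1.getD n []).length ≤
            (dom.getD n []).length)) ∧
        ((l.foldl
            (fun st n =>
              let new_dom := pvNewDom st.1 (pvPred ds s n) n
              if PySem.Set.equal new_dom (st.1.getD n []) then st
              else (st.1.insert n new_dom, true)) st0).2 = true →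
          pvM ds s (l.foldl
              (fun st n =>
                let new_dom := pvNewDom st.1 (pvPred ds s n) n
                if PySem.Set.equal new_dom (st.1.getD n []) then st
                else (st.1.insert n new_dom, true)) st0).1 < pvM ds s dom) := by
  intro l
  induction l with
  | nil =>
    intro _ st0 h1 h2 h3 h4
    exact ⟨h1, fun hf => ⟨h2 hf, hf, by simp⟩, h3, h4⟩
  | cons n l' ih =>
    intro hl st0 hst0 hfalse hlen hM
    have hn : n ∈ (pvTopo ds s).drop 1 := hl n List.mem_cons_self
    have hns : n ≠ s := ((pvMem_drop_iff ds s n).mp hn).2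
    simp only [List.foldl_cons]
    by_cases hEq : PySem.Set.equal (pvNewDom st0.1 (pvPred ds s n) n) (st0.1.getD n []) = true
    · rw [if_pos hEq]
      have hres := ih (fun m hm => hl m (List.mem_cons_of_mem _ hm)) st0 hst0 hfalse hlen hM
      refine ⟨hres.1, ?_, hres.2.2.1, hres.2.2.2⟩
      intro hf
      obtain ⟨hr1, hr2, hr3⟩ := hres.2.1 hf
      refine ⟨hr1, hr2, ?_⟩
      intro m hm
      rcases List.mem_cons.mp hm with rfl | hm'
      · rw [← hfalse hr2]
        exact hEq
      · exact hr3 m hm'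
    · rw [if_neg hEq]
      set nd := pvNewDom st0.1 (pvPred ds s n) n with hnd
      obtain ⟨hndN, hndT, hndD⟩ := pvNewDom_props hst0 hn
      have hsub : ∀ x ∈ nd, x ∈ st0.1.getD n [] := (hst0.2 n hn).2.2.2
      have hpoint : ∀ p x, x ∈ (st0.1.insert n nd).getD p [] → x ∈ st0.1.getD p [] := by
        intro p x hx
        rw [PySem.Dict.getD_insert] at hx
        by_cases hp : p = n
        · rw [if_pos hp] at hx
          rw [hp]
          exact hsub x hx
        · rwa [if_neg hp] at hx
      have hlt : nd.length < (st0.1.getD n []).length := by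
        have hle := (List.Nodup.subperm hndN hsub).length_le
        rcases Nat.lt_or_ge nd.length (st0.1.getD n []).length with h | h
        · exact h
        · exfalso
          have hperm := (List.Nodup.subperm hndN hsub).perm_of_length_le h
          apply hEq
          rw [PySem.Set.equal_iff]
          intro x
          exact hperm.mem_iff
      have hOK1 : pvOKDom ds s (st0.1.insert n nd) := by
        refine ⟨?_, ?_⟩
        · rw [PySem.Dict.getD_insert, if_neg hns.symm]
          exact hst0.1
        · intro m hm
          by_cases hmn : m = n
          · subst hmn
            rw [PySem.Dict.getD_insert_self]
            refine ⟨hndN, hndT, hndD, ?_⟩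
            intro x hx
            exact pvNewDom_mono (fun p _ => hpoint p) x hx
          · rw [PySem.Dict.getD_insert, if_neg hmn]
            obtain ⟨o1, o2, o3, o4⟩ := hst0.2 m hm
            refine ⟨o1, o2, o3, ?_⟩
            intro x hx
            exact o4 x (pvNewDom_mono (fun p _ => hpoint p) x hx)
      have hlen1 : ∀ m ∈ (pvTopo ds s).drop 1,
          (((st0.1.insert n nd).getD m []).length ≤ (dom.getD m []).length) := by
        intro m hm
        rw [PySem.Dict.getD_insert]
        by_cases hmn : m = n
        · rw [if_pos hmn]
          subst hmn
          exact Nat.le_trans (Nat.le_of_lt hlt) (hlen m hm)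
        · rw [if_neg hmn]
          exact hlen m hm
      have hM1 : pvM ds s (st0.1.insert n nd) < pvM ds s dom := by
        have hlt' : pvM ds s (st0.1.insert n nd) < pvM ds s st0.1 := by
          unfold pvM
          apply List.sum_lt_sum
          · intro m hm
            rw [PySem.Dict.getD_insert]
            by_cases hmn : m = n
            · rw [if_pos hmn]
              subst hmn
              exact Nat.le_of_lt hlt
            · rw [if_neg hmn]
          · refine ⟨n, hn, ?_⟩
            rw [PySem.Dict.getD_insert_self]
            exact hlt
        rcases Bool.eq_false_or_eq_true st0.2 with hb | hb
        · exact Nat.lt_trans hlt' (hM hb)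
        · rw [hfalse hb] at hlt'
          rw [hfalse hb]
          exact hlt'
      have hres := ih (fun m hm => hl m (List.mem_cons_of_mem _ hm))
        (st0.1.insert n nd, true) hOK1 (by intro h; exact absurd h (by simp))
        hlen1 (fun _ => hM1)
      refine ⟨hres.1, ?_, hres.2.2.1, hres.2.2.2⟩
      intro hf
      obtain ⟨_, hcontra, _⟩ := hres.2.1 hf
      exact absurd hcontra (by simp)

theorem pvPassA_spec (ds : List (String × List String)) (s : String)
    (dom : PySem.Dict String (PySem.Set String)) (h : pvOKDom ds s dom) :
    pvOKDom ds s (pvPassA (fun n => (pvPredD ds s).getD n []) ((pvTopo ds s).drop 1) dom).1 ∧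
    ((pvPassA (fun n => (pvPredD ds s).getD n []) ((pvTopo ds s).drop 1) dom).2 = false →
      (pvPassA (fun n => (pvPredD ds s).getD n []) ((pvTopo ds s).drop 1) dom).1 = dom ∧
      ∀ n ∈ (pvTopo ds s).drop 1,
        PySem.Set.equal (pvNewDom dom (pvPred ds s n) n) (dom.getD n []) = true) ∧
    ((pvPassA (fun n => (pvPredD ds s).getD n []) ((pvTopo ds s).drop 1) dom).2 = true →
      pvM ds s (pvPassA (fun n => (pvPredD ds s).getD n []) ((pvTopo ds s).drop 1) dom).1 <
        pvM ds s dom) := by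
  have h := pvPass_fold ds s dom h ((pvTopo ds s).drop 1) (fun _ hn => hn) (dom, false)
    h (fun _ => rfl) (fun _ _ => Nat.le_refl _) (fun hb => absurd hb (by simp))
  exact ⟨h.1, fun hf => ⟨(h.2.1 hf).1, (h.2.1 hf).2.2⟩, h.2.2.2⟩

theorem pvLoopA_spec (ds : List (String × List String)) (s : String) :
    ∀ (fuel : Nat) (dom : PySem.Dict String (PySem.Set String)), pvOKDom ds s dom →
      pvM ds s dom < fuel →
      pvOKDom ds s
        (pvLoopA (fun n => (pvPredD ds s).getD n []) ((pvTopo ds s).drop 1) fuel dom) ∧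
      ∀ n ∈ (pvTopo ds s).drop 1,
        PySem.Set.equal
          (pvNewDom
            (pvLoopA (fun n => (pvPredD ds s).getD n []) ((pvTopo ds s).drop 1) fuel dom)
            (pvPred ds s n) n)
          ((pvLoopA (fun n => (pvPredD ds s).getD n []) ((pvTopo ds s).drop 1) fuel dom).getD
            n []) = true := by
  intro fuel
  induction fuel with
  | zero => intro dom _ hM; exact absurd hM (Nat.not_lt_zero _)
  | succ fuel ih =>
    intro dom hOK hM
    have hp := pvPassA_spec ds s dom hOK
    have hunf : pvLoopA (fun n => (pvPredD ds s).getD n []) ((pvTopo ds s).drop 1)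
        (fuel + 1) dom =
        (if (pvPassA (fun n => (pvPredD ds s).getD n []) ((pvTopo ds s).drop 1) dom).2 then
          pvLoopA (fun n => (pvPredD ds s).getD n []) ((pvTopo ds s).drop 1) fuel
            (pvPassA (fun n => (pvPredD ds s).getD n []) ((pvTopo ds s).drop 1) dom).1
        else (pvPassA (fun n => (pvPredD ds s).getD n []) ((pvTopo ds s).drop 1) dom).1) :=
      rfl
    rcases Bool.eq_false_or_eq_true
        (pvPassA (fun n => (pvPredD ds s).getD n []) ((pvTopo ds s).drop 1) dom).2 with hb | hb
    · rw [hunf, hb, if_pos rfl]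
      have hM' := hp.2.2 hb
      exact ih _ hp.1 (by omega)
    · rw [hunf, hb]
      simp only [Bool.false_eq_true, if_false]
      obtain ⟨heq, hall⟩ := hp.2.1 hb
      rw [heq]
      exact ⟨hOK, hall⟩

theorem pvInitDom_OK (ds : List (String × List String)) (s : String) : pvOKDom ds s (pvInitDom ds s) := by
  have hs0 : (pvInitDom ds s).getD s [] = [s] := by
    unfold pvInitDom
    rw [pvGetD_foldl_insert_const]
    rw [if_neg (pvStart_not_mem_drop ds s)]
    rw [PySem.Dict.getD_insert_self]
    rfl
  have hn0 : ∀ n ∈ (pvTopo ds s).drop 1,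
      (pvInitDom ds s).getD n [] = PySem.Set.ofList (pvTopo ds s) := by
    intro n hn
    unfold pvInitDom
    rw [pvGetD_foldl_insert_const, if_pos hn]
  refine ⟨hs0, ?_⟩
  intro n hn
  rw [hn0 n hn]
  have hnt : n ∈ pvTopo ds s := ((pvMem_drop_iff ds s n).mp hn).1
  refine ⟨PySem.Set.nodup_ofList _, ?_, ?_, ?_⟩
  · intro x hx
    exact (PySem.Set.mem_ofList _ x).mp hx
  · intro d hd
    rw [PySem.Set.mem_ofList]
    rw [pvMem_topo_iff_reach]
    exact pvRelDom_reach hd ((pvMem_topo_iff_reach ds s n).mp hnt)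
  · intro x hx
    have hne := pvPred_ne_nil hn
    rw [pvMem_newDom hne] at hx
    rw [PySem.Set.mem_ofList]
    rcases hx with ⟨h1, _⟩ | h1
    · cases hp : pvPred ds s n with
      | nil => exact absurd hp hne
      | cons p ps =>
        rw [hp] at h1
        simp only [List.headD_cons] at h1
        have hpt : p ∈ pvTopo ds s :=
          ((pvPred_mem ds s n p).mp (hp ▸ List.mem_cons_self)).1
        by_cases hps : p = s
        · subst hps
          rw [hs0] at h1
          simp only [List.mem_singleton] at h1
          rw [h1]
          exact hpt
        · rw [hn0 p ((pvMem_drop_iff ds s p).mpr ⟨hpt, hps⟩)] at h1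
          exact (PySem.Set.mem_ofList _ x).mp h1
    · rw [h1]; exact hnt

theorem pvResDom_spec (ds : List (String × List String)) (s : String) :
    pvOKDom ds s (pvResDom ds s) ∧
    ∀ n ∈ (pvTopo ds s).drop 1,
      PySem.Set.equal (pvNewDom (pvResDom ds s) (pvPred ds s n) n)
        ((pvResDom ds s).getD n []) = true := by
  have hM0 : pvM ds s (pvInitDom ds s) <
      (pvTopo ds s).length * (pvTopo ds s).length + 2 := by
    unfold pvM
    have hb : ∀ x ∈ ((pvTopo ds s).drop 1).map
        (fun n => ((pvInitDom ds s).getD n []).length), x ≤ (pvTopo ds s).length := by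
      intro x hx
      obtain ⟨n, hn, rfl⟩ := List.mem_map.mp hx
      unfold pvInitDom
      rw [pvGetD_foldl_insert_const, if_pos hn]
      exact PySem.Set.length_ofList_le _
    have := List.sum_le_card_nsmul _ _ hb
    simp only [List.length_map, smul_eq_mul] at this
    have hdl : ((pvTopo ds s).drop 1).length ≤ (pvTopo ds s).length :=
      (List.drop_sublist _ _).length_le
    have := Nat.le_trans this (Nat.mul_le_mul_right _ hdl)
    omega
  exact pvLoopA_spec ds s _ (pvInitDom ds s) (pvInitDom_OK ds s) hM0

theorem pvResDom_subset_dom (ds : List (String × List String)) (s : String) :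
    ∀ (l : List String) (x : String), pvPath ds s l x →
      ∀ d ∈ (pvResDom ds s).getD x [], d ∈ l := by
  obtain ⟨hOK, hfix⟩ := pvResDom_spec ds s
  intro l x hl
  induction hl with
  | nil =>
    intro d hd
    rw [hOK.1] at hd
    exact hd
  | @cons l' v w hp hw ih =>
    intro d hd
    have hwt : w ∈ pvTopo ds s := (pvMem_topo_iff_reach ds s w).mpr ⟨l' ++ [w], pvPath.cons hp hw⟩
    by_cases hws : w = s
    · subst hws
      rw [hOK.1] at hd
      simp only [List.mem_singleton] at hd
      rw [hd]
      exact List.mem_append_left _ (pvPath_start_mem hp)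
    · have hwd : w ∈ (pvTopo ds s).drop 1 := (pvMem_drop_iff ds s w).mpr ⟨hwt, hws⟩
      have heq := hfix w hwd
      rw [PySem.Set.equal_iff] at heq
      have hd' : d ∈ pvNewDom (pvResDom ds s) (pvPred ds s w) w := (heq d).mpr hd
      have hne := pvPred_ne_nil hwd
      rw [pvMem_newDom hne] at hd'
      rcases hd' with ⟨_, hall⟩ | hdw
      · have hvt : v ∈ pvTopo ds s := (pvMem_topo_iff_reach ds s v).mpr ⟨l', hp⟩
        have hvp : v ∈ pvPred ds s w := (pvPred_mem ds s w v).mpr ⟨hvt, hw, hwt⟩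
        exact List.mem_append_left _ (ih d (hall v hvp))
      · rw [hdw]
        exact List.mem_append_right _ List.mem_cons_self

theorem pvResDom_iff {ds : List (String × List String)} {s : String} {n : String}
    (hn : n ∈ pvTopo ds s) (d : String) :
    d ∈ (pvResDom ds s).getD n [] ↔ pvRelDom ds s d n := by
  obtain ⟨hOK, _⟩ := pvResDom_spec ds s
  constructor
  · intro hd l hl
    exact pvResDom_subset_dom ds s l n hl d hd
  · intro hd
    by_cases hns : n = s
    · subst hns
      rw [hOK.1]
      have := (pvRelDom_start_iff ds n d).mp hd
      simp [this]
    · exact (hOK.2 n ((pvMem_drop_iff ds s n).mpr ⟨hn, hns⟩)).2.2.1 d hd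

-- ---------- the immediate-dominator extraction ----------

def pvQ (ds : List (String × List String)) (s n d : String) : Prop :=
  pvRelDom ds s d n ∧ d ≠ n ∧
    ∀ c, pvRelDom ds s c n → c ≠ n → c ≠ d → pvRelDom ds s c d

theorem pvQ_unique {ds : List (String × List String)} {s n : String}
    (hn : pvReach ds s n) {d₁ d₂ : String} (h₁ : pvQ ds s n d₁) (h₂ : pvQ ds s n d₂) :
    d₁ = d₂ := by
  by_contra hne
  obtain ⟨hd1, hd1n, hq1⟩ := h₁
  obtain ⟨hd2, hd2n, hq2⟩ := h₂
  have h12 : pvRelDom ds s d₂ d₁ := hq1 d₂ hd2 hd2n (fun h => hne h.symm)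
  have h21 : pvRelDom ds s d₁ d₂ := hq2 d₁ hd1 hd1n hne
  exact hne (pvRelDom_antisymm h21 h12 (pvRelDom_reach hd1 hn))

theorem pvFind?_eq {p q : String → Bool} {l₁ l₂ : List String}
    (hpq : ∀ x, (x ∈ l₁ ∧ p x = true) ↔ (x ∈ l₂ ∧ q x = true))
    (huniq : ∀ x y, x ∈ l₁ → p x = true → y ∈ l₁ → p y = true → x = y) :
    l₁.find? p = l₂.find? q := by
  cases h1 : l₁.find? p with
  | none =>
    cases h2 : l₂.find? q with
    | none => rfl
    | some y =>
      exfalso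
      have hy : y ∈ l₂ ∧ q y = true := ⟨List.mem_of_find?_eq_some h2, List.find?_some h2⟩
      obtain ⟨hy1, hy2⟩ := (hpq y).mpr hy
      exact (List.find?_eq_none.mp h1 y hy1) hy2
  | some x =>
    have hx : x ∈ l₁ ∧ p x = true := ⟨List.mem_of_find?_eq_some h1, List.find?_some h1⟩
    obtain ⟨hx2, hqx⟩ := (hpq x).mp hx
    cases h2 : l₂.find? q with
    | none =>
      exfalso
      exact (List.find?_eq_none.mp h2 x hx2) hqx
    | some y =>
      have hy : y ∈ l₂ ∧ q y = true := ⟨List.mem_of_find?_eq_some h2, List.find?_some h2⟩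
      obtain ⟨hy1, hy2⟩ := (hpq y).mpr hy
      rw [huniq x y hx.1 hx.2 hy1 hy2]

def pvFA (ds : List (String × List String)) (s : String) (n : String) : Option String :=
  (PySem.Set.diff ((pvResDom ds s).getD n []) [n]).find? fun dd =>
    PySem.Set.issubset
      (PySem.Set.diff (PySem.Set.diff ((pvResDom ds s).getD n []) [n]) [dd])
      ((pvResDom ds s).getD dd [])

def pvFB (ds : List (String × List String)) (s : String) (n : String) : Option String :=
  ((pvTopo ds s).filter fun d =>
      !(PySem.Set.contains ((pvRW ds s).getD d []) n)).reverse.find? fun d =>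
    d != n &&
      ((pvTopo ds s).filter fun d =>
          !(PySem.Set.contains ((pvRW ds s).getD d []) n)).all fun c =>
        c == n || c == d || !(PySem.Set.contains ((pvRW ds s).getD c []) d)

theorem pvFA_eq_FB (ds : List (String × List String)) (s : String) {n : String}
    (hn : n ∈ (pvTopo ds s).drop 1) : pvFA ds s n = pvFB ds s n := by
  have hnt : n ∈ pvTopo ds s := ((pvMem_drop_iff ds s n).mp hn).1
  have hreachn : pvReach ds s n := (pvMem_topo_iff_reach ds s n).mp hnt
  have hLA : ∀ x, x ∈ PySem.Set.diff ((pvResDom ds s).getD n []) [n] ↔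
      (pvRelDom ds s x n ∧ x ≠ n) := by
    intro x
    rw [PySem.Set.mem_diff, pvResDom_iff hnt]
    simp
  have hFilt : ∀ x, x ∈ (pvTopo ds s).filter
      (fun d => !(PySem.Set.contains ((pvRW ds s).getD d []) n)) ↔ pvRelDom ds s x n := by
    intro x
    rw [List.mem_filter]
    constructor
    · rintro ⟨hxt, hc⟩
      rw [pvRW_getD, if_pos hxt] at hc
      have hna : n ∉ pvReachAvoid ds s x := by
        simpa [PySem.Set.contains_eq_listContains, List.contains_iff_mem] using hc
      exact (pvNotReachAvoid_iff ds x hreachn).mp hna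
    · intro hdom
      have hxt : x ∈ pvTopo ds s :=
        (pvMem_topo_iff_reach ds s x).mpr (pvRelDom_reach hdom hreachn)
      refine ⟨hxt, ?_⟩
      rw [pvRW_getD, if_pos hxt]
      have := (pvNotReachAvoid_iff ds x hreachn).mpr hdom
      simpa [PySem.Set.contains_eq_listContains, List.contains_iff_mem] using this
  have hPA : ∀ x, x ∈ PySem.Set.diff ((pvResDom ds s).getD n []) [n] →
      ((PySem.Set.issubset
          (PySem.Set.diff (PySem.Set.diff ((pvResDom ds s).getD n []) [n]) [x])
          ((pvResDom ds s).getD x []) = true) ↔ pvQ ds s n x) := by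
    intro x hmem
    obtain ⟨hxd, hxn⟩ := (hLA x).mp hmem
    have hxt : x ∈ pvTopo ds s :=
      (pvMem_topo_iff_reach ds s x).mpr (pvRelDom_reach hxd hreachn)
    rw [PySem.Set.issubset_iff]
    constructor
    · intro hsub
      refine ⟨hxd, hxn, ?_⟩
      intro c hc hcn hcx
      have hcmem : c ∈ PySem.Set.diff
          (PySem.Set.diff ((pvResDom ds s).getD n []) [n]) [x] := by
        rw [PySem.Set.mem_diff, PySem.Set.mem_diff, pvResDom_iff hnt]
        simp only [List.mem_singleton]
        exact ⟨⟨hc, hcn⟩, hcx⟩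
      exact (pvResDom_iff hxt c).mp (hsub c hcmem)
    · rintro ⟨_, _, hq⟩ c hcmem
      rw [PySem.Set.mem_diff, PySem.Set.mem_diff, pvResDom_iff hnt] at hcmem
      simp only [List.mem_singleton] at hcmem
      exact (pvResDom_iff hxt c).mpr (hq c hcmem.1.1 hcmem.1.2 hcmem.2)
  have hPB : ∀ x, x ∈ ((pvTopo ds s).filter
        (fun d => !(PySem.Set.contains ((pvRW ds s).getD d []) n))).reverse →
      ((x != n &&
          ((pvTopo ds s).filter fun d =>
              !(PySem.Set.contains ((pvRW ds s).getD d []) n)).all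
            (fun c => c == n || c == x ||
              !(PySem.Set.contains ((pvRW ds s).getD c []) x))) = true ↔
        pvQ ds s n x) := by
    intro x hmemrev
    have hxF := (hFilt x).mp (List.mem_reverse.mp hmemrev)
    have hreachx : pvReach ds s x := pvRelDom_reach hxF hreachn
    simp only [Bool.and_eq_true, bne_iff_ne, List.all_eq_true, Bool.or_eq_true, beq_iff_eq,
      Bool.not_eq_true']
    constructor
    · rintro ⟨hxn, hall⟩
      refine ⟨hxF, hxn, ?_⟩
      intro c hcdom hcn hcx
      have hcF : c ∈ (pvTopo ds s).filter
          (fun d => !(PySem.Set.contains ((pvRW ds s).getD d []) n)) := (hFilt c).mpr hcdom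
      have hct : c ∈ pvTopo ds s := (List.mem_filter.mp hcF).1
      rcases hall c hcF with (h | h) | h
      · exact absurd h hcn
      · exact absurd h hcx
      · rw [pvRW_getD, if_pos hct] at h
        have hxa : x ∉ pvReachAvoid ds s c := by
          intro hmem
          have hc2 := (PySem.Set.contains_iff (pvReachAvoid ds s c) x).mpr hmem
          rw [hc2] at h
          exact absurd h (by simp)
        exact (pvNotReachAvoid_iff ds c hreachx).mp hxa
    · rintro ⟨_, hxn, hq⟩
      refine ⟨hxn, ?_⟩
      intro c hcF
      have hcdom := (hFilt c).mp hcF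
      have hct : c ∈ pvTopo ds s := (List.mem_filter.mp hcF).1
      by_cases h1 : c = n
      · exact Or.inl (Or.inl h1)
      by_cases h2 : c = x
      · exact Or.inl (Or.inr h2)
      refine Or.inr ?_
      have hdomcx : pvRelDom ds s c x := hq c hcdom h1 h2
      have hno : x ∉ pvReachAvoid ds s c := (pvNotReachAvoid_iff ds c hreachx).mpr hdomcx
      rw [pvRW_getD, if_pos hct, Bool.eq_false_iff]
      intro hcontains
      exact hno ((PySem.Set.contains_iff _ _).mp hcontains)
  apply pvFind?_eq
  · intro x
    constructor
    · rintro ⟨hm, hp⟩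
      have hQ := (hPA x hm).mp hp
      have hmB : x ∈ ((pvTopo ds s).filter
          (fun d => !(PySem.Set.contains ((pvRW ds s).getD d []) n))).reverse :=
        List.mem_reverse.mpr ((hFilt x).mpr hQ.1)
      exact ⟨hmB, (hPB x hmB).mpr hQ⟩
    · rintro ⟨hm, hp⟩
      have hQ := (hPB x hm).mp hp
      have hmA : x ∈ PySem.Set.diff ((pvResDom ds s).getD n []) [n] :=
        (hLA x).mpr ⟨hQ.1, hQ.2.1⟩
      exact ⟨hmA, (hPA x hmA).mpr hQ⟩
  · intro x y hx hpx hy hpy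
    exact pvQ_unique hreachn ((hPA x hx).mp hpx) ((hPA y hy).mp hpy)

-- ===== VERDICT (by name: the statement is the Claim_ definition above) =====
theorem build_dominance_tree_spec : Claim_equal_build_dominance_tree := by
  intro start dag_nodes dag_succ _
  unfold Spec_build_dominance_tree
  have hA : build_dominance_tree start dag_nodes dag_succ =
      (((pvTopo dag_succ start).drop 1).foldl
          (fun acc n => acc.insert n (pvFA dag_succ start n))
          ((PySem.Dict.empty).insert start (none : Option String))).items := rfl
  have hB : build_dominance_tree_alt start dag_nodes dag_succ =
      (((pvTopo dag_succ start).drop 1).foldl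
          (fun acc n => acc.insert n (pvFB dag_succ start n))
          ((PySem.Dict.empty).insert start (none : Option String))).items := rfl
  have hfresh : ∀ a ∈ (pvTopo dag_succ start).drop 1,
      ((PySem.Dict.empty : PySem.Dict String (Option String)).insert start none).contains a =
        false := by
    intro a ha
    have hane : a ≠ start := ((pvMem_drop_iff dag_succ start a).mp ha).2
    rw [PySem.Dict.contains_insert]
    simp [hane, PySem.Dict.contains_empty]
  have hnodup : (((pvTopo dag_succ start).drop 1).map (fun n => n)).Nodup := by
    rw [List.map_id']
    exact (pvTopo_nodup dag_succ start).sublist (List.drop_sublist _ _)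
  have hitemsA := PySem.Dict.items_foldl_insert_fresh
    (l := (pvTopo dag_succ start).drop 1) (k := fun n => n)
    (v := fun n => pvFA dag_succ start n)
    (d := (PySem.Dict.empty).insert start (none : Option String)) hfresh hnodup
  have hitemsB := PySem.Dict.items_foldl_insert_fresh
    (l := (pvTopo dag_succ start).drop 1) (k := fun n => n)
    (v := fun n => pvFB dag_succ start n)
    (d := (PySem.Dict.empty).insert start (none : Option String)) hfresh hnodup
  rw [hA, hB, hitemsA, hitemsB]
  congr 1
  apply List.map_congr_left
  intro n hn
  dsimp only
  rw [pvFA_eq_FB dag_succ start hn]
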